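-- pv_equiv track=rewrite | github.com/jungbumwoo/algorithm | implement/p_shuttle_bus.py | _get_bus_status
-- ===== SOURCE A (Python) =====
-- def _get_bus_status(n, m, t, arr):
--     index = -1
--     arrive = 9 * 60 - t
--     last_bus_cnt = 0
--     for b in range(1, n + 1):
--         arrive += int(t)
--
--         for _ in range(int(m)):
--             if index + 1 <= len(arr) - 1 and arr[index + 1] <= arrive:
--                 index += 1
--                 if b == n:
--                     last_bus_cnt += 1
--             else:
--                 break
--     return index, last_bus_cnt == m
-- ===== SOURCE B (Python) =====
-- def _get_bus_status(n, m, t, arr):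
--     # passenger-major: iterate over the queue, advancing the bus pointer as needed
--     cap = max(int(m), 0)
--     b = 1
--     used = 0
--     index = -1
--     last = 0
--     for x in arr:
--         while b <= n and (used == cap or x > 540 + (b - 1) * int(t)):
--             b += 1
--             used = 0
--         if b > n:
--             break
--         used += 1
--         index += 1
--         if b == n:
--             last += 1
--     return index, last == m
-- ===== Notes on version B (the rewrite author's own statement) =====
-- stated objective: alternative
-- what changed: Loop interchange: instead of A's bus-major simulation (outer loop over n buses, inner capped per-passenger loop with index arithmetic), B is passenger-major: a single pass directly over arr that advances a bus pointer with an inner while (seats full or passenger not yet arrived) and breaks once the buses are exhausted.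
import Mathlib
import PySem

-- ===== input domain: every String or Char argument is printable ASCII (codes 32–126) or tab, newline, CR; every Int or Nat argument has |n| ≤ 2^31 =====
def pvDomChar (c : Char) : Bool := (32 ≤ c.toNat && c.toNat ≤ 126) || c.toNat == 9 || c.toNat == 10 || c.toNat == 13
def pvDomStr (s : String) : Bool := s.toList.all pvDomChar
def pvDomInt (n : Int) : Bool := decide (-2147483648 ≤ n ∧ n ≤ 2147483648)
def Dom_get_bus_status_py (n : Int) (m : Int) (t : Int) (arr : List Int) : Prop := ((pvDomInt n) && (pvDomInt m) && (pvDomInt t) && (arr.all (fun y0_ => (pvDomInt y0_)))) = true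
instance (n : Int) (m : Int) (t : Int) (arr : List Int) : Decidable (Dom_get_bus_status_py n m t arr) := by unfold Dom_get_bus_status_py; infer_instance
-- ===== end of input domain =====

-- B is a loop interchange of A: a single passenger-major pass over arr with a bus-advancing
-- while, instead of A's bus-major loop with a capped inner passenger loop; proved to return
-- A's exact value on all inputs (alternative decomposition, same asymptotic cost).


-- ===== PORT A =====
-- inner 'for _ in range(int(m)): … else break' loop; state = (index, last_bus_cnt)
def pvInnerA (arr : List Int) (arrive : Int) (isLast : Bool) : Nat → Int × Int → Int × Int
  | 0, st => st
  | f+1, (index, last) =>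
    if index + 1 ≤ (arr.length : Int) - 1 ∧ (PySem.List.pyGet? arr (index + 1)).getD 0 ≤ arrive then
      pvInnerA arr arrive isLast f (index + 1, if isLast then last + 1 else last)
    else (index, last)

-- one iteration of A's 'for b in range(1, n + 1)'; state = (index, arrive, last_bus_cnt)
def pvStepA (n m t : Int) (arr : List Int) (s : Int × Int × Int) (b : Int) : Int × Int × Int :=
  let arrive := s.2.1 + t
  let r := pvInnerA arr arrive (b == n) m.toNat (s.1, s.2.2)
  (r.1, arrive, r.2)

def get_bus_status_py (n : Int) (m : Int) (t : Int) (arr : List Int) : Int × Bool :=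
  let st := (PySem.List.pyRange 1 (n + 1) 1).foldl (pvStepA n m t arr) (-1, 9 * 60 - t, 0)
  (st.1, decide (st.2.2 = m))

-- ===== PORT B =====
-- B's 'while b <= n and (used == cap or x > 540 + (b-1)*t)' bus-advancing loop;
-- fuel = (n + 1 - b).toNat is exact: when it reaches 0 we have b > n and the condition is false
def pvWhileB (n t : Int) (cap : Nat) (x : Int) : Nat → Int → Nat → Int × Nat
  | 0, b, used => (b, used)
  | f+1, b, used =>
    if b ≤ n ∧ (used = cap ∨ 540 + (b - 1) * t < x) then pvWhileB n t cap x f (b + 1) 0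
    else (b, used)

-- B's 'for x in arr' pass; state = (b, used, index, last), break when b > n
def pvBodyB (n t : Int) (cap : Nat) : List Int → Int → Nat → Int → Int → Int × Int
  | [], _, _, index, last => (index, last)
  | x :: xs, b, used, index, last =>
    let r := pvWhileB n t cap x (n + 1 - b).toNat b used
    if n < r.1 then (index, last)
    else pvBodyB n t cap xs r.1 (r.2 + 1) (index + 1) (if r.1 = n then last + 1 else last)

def get_bus_status_py_alt (n : Int) (m : Int) (t : Int) (arr : List Int) : Int × Bool :=
  let cap := (max m 0).toNat
  let st := pvBodyB n t cap arr 1 0 (-1) 0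
  (st.1, decide (st.2 = m))

-- ===== PRECONDITION & SPEC =====
def Spec_get_bus_status_py (n : Int) (m : Int) (t : Int) (arr : List Int) (out : Int × Bool) : Prop := out = get_bus_status_py_alt n m t arr
instance (n : Int) (m : Int) (t : Int) (arr : List Int) (out : Int × Bool) : Decidable (Spec_get_bus_status_py n m t arr out) := by unfold Spec_get_bus_status_py; infer_instance

-- ===== CLAIM (what is proved, stated in full; the proofs are below) =====
def Claim_equal_get_bus_status_py : Prop := ∀ (n : Int) (m : Int) (t : Int) (arr : List Int), Dom_get_bus_status_py n m t arr → Spec_get_bus_status_py n m t arr (get_bus_status_py n m t arr)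

-- ===== LEMMAS AND PROOFS =====

-- proof-only intermediate: capped prefix scan of arr against one bus's arrival time
def pvScanB (arr : List Int) (arrive : Int) : Nat → Int → Int
  | 0, idx => idx
  | f+1, idx =>
    if idx < (arr.length : Int) ∧ (PySem.List.pyGet? arr idx).getD 0 ≤ arrive then
      pvScanB arr arrive f (idx + 1)
    else idx

-- proof-only intermediate: bus-major loop by capped scans, fuel = remaining buses
def pvG (n t : Int) (arr : List Int) (cap : Nat) : Nat → Int → Int → Int → Int × Int
  | 0, _, idx, last => (idx, last)
  | k+1, b, idx, last =>
    let s := pvScanB arr (540 + (b - 1) * t) cap idx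
    pvG n t arr cap k (b + 1) s (if b = n then last + (s - idx) else last)

theorem pvScanB_le (arr : List Int) (arrive : Int) (f : Nat) (idx : Int) :
    idx ≤ pvScanB arr arrive f idx := by
  induction f generalizing idx with
  | zero => simp [pvScanB]
  | succ f ih =>
    simp only [pvScanB]
    split
    · exact le_trans (by omega) (ih (idx + 1))
    · omega

theorem pvScanB_le_len (arr : List Int) (arrive : Int) (f : Nat) (idx : Int)
    (h : idx ≤ (arr.length : Int)) : pvScanB arr arrive f idx ≤ (arr.length : Int) := by
  induction f generalizing idx with
  | zero => simpa [pvScanB]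
  | succ f ih =>
    simp only [pvScanB]
    split
    · rename_i hc; exact ih (idx + 1) (by omega)
    · exact h

-- lockstep: one inner pass of A equals the capped scan (A's index = scan pointer - 1)
theorem pvInnerA_eq_scan (arr : List Int) (arrive : Int) (isLast : Bool) (f : Nat)
    (idx last : Int) (h0 : 0 ≤ idx) :
    pvInnerA arr arrive isLast f (idx - 1, last)
      = (pvScanB arr arrive f idx - 1,
         if isLast then last + (pvScanB arr arrive f idx - idx) else last) := by
  induction f generalizing idx last with
  | zero => cases isLast <;> simp [pvInnerA, pvScanB]
  | succ f ih =>
    have hidx : idx - 1 + 1 = idx := by omega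
    simp only [pvInnerA, pvScanB, hidx]
    by_cases hc : idx < (arr.length : Int) ∧ (PySem.List.pyGet? arr idx).getD 0 ≤ arrive
    · rw [if_pos ⟨by omega, hc.2⟩, if_pos hc]
      have := ih (idx + 1) (if isLast then last + 1 else last) (by omega)
      have h2 : idx + 1 - 1 = idx := by omega
      rw [h2] at this
      rw [this]
      cases isLast
      · simp
      · simp; omega
    · rw [if_neg (fun h => hc ⟨by omega, h.2⟩), if_neg hc]
      cases isLast <;> simp

-- A's bus fold equals the bus-major scan loop pvG
theorem pvOuterA (n m t : Int) (arr : List Int) (k : Nat) :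
    ∀ (b idx last : Int), 0 ≤ idx → b + k = n + 1 →
    (let st := (PySem.List.pyRange b (n + 1) 1).foldl (pvStepA n m t arr)
        (idx - 1, 540 - t + (b - 1) * t, last)
     (st.1, st.2.2))
      = ((pvG n t arr m.toNat k b idx last).1 - 1, (pvG n t arr m.toNat k b idx last).2) := by
  induction k with
  | zero =>
    intro b idx last h0 hk
    have hnil : PySem.List.pyRange b (n + 1) 1 = [] :=
      PySem.List.pyRange_one_eq_nil (by omega)
    simp [hnil, pvG]
  | succ k ih =>
    intro b idx last h0 hk
    have hcons : PySem.List.pyRange b (n + 1) 1 = b :: PySem.List.pyRange (b + 1) (n + 1) 1 :=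
      PySem.List.pyRange_one_cons (by omega)
    rw [hcons]
    simp only [List.foldl_cons, pvStepA]
    have har : 540 - t + (b - 1) * t + t = 540 + (b - 1) * t := by ring
    rw [har]
    rw [pvInnerA_eq_scan arr _ (b == n) m.toNat idx last h0]
    set s := pvScanB arr (540 + (b - 1) * t) m.toNat idx with hs
    have hs0 : idx ≤ s := pvScanB_le arr _ m.toNat idx
    simp only [pvG, ← hs]
    have hrec := ih (b + 1) s (if b = n then last + (s - idx) else last) (by omega) (by omega)
    dsimp only at hrec
    have har2 : 540 + (b - 1) * t = 540 - t + (b + 1 - 1) * t := by ring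
    rw [har2]
    by_cases hbn : b = n
    · simpa [hbn] using hrec
    · simpa [hbn] using hrec

-- the while makes no step when its condition fails
theorem pvWhileB_stay (n t : Int) (cap : Nat) (x : Int) (f : Nat) (b : Int) (used : Nat)
    (h : ¬ (b ≤ n ∧ (used = cap ∨ 540 + (b - 1) * t < x))) :
    pvWhileB n t cap x f b used = (b, used) := by
  cases f with
  | zero => rfl
  | succ f => simp only [pvWhileB]; rw [if_neg h]

-- once the buses are exhausted, B returns its accumulators unchanged
theorem pvBodyB_stop (n t : Int) (cap : Nat) (xs : List Int) (b : Int) (u : Nat) (i l : Int)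
    (h : n < b) : pvBodyB n t cap xs b u i l = (i, l) := by
  cases xs with
  | nil => rfl
  | cons x xs =>
    have hw := pvWhileB_stay n t cap x (n + 1 - b).toNat b u (fun hh => absurd hh.1 (by omega))
    simp [pvBodyB, hw, h]

-- bus transition: when the head passenger cannot board bus b, B behaves as from (b+1, 0)
theorem pvBodyB_adv (n t : Int) (cap : Nat) (x : Int) (xs : List Int) (b : Int) (used : Nat)
    (i l : Int) (hb : b ≤ n) (h : used = cap ∨ 540 + (b - 1) * t < x) :
    pvBodyB n t cap (x :: xs) b used i l = pvBodyB n t cap (x :: xs) (b + 1) 0 i l := by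
  have hf : (n + 1 - b).toNat = (n + 1 - (b + 1)).toNat + 1 := by omega
  have hcnd : b ≤ n ∧ (used = cap ∨ 540 + (b - 1) * t < x) := ⟨hb, h⟩
  have hw : pvWhileB n t cap x ((n + 1 - (b + 1)).toNat + 1) b used
      = pvWhileB n t cap x (n + 1 - (b + 1)).toNat (b + 1) 0 := by
    simp only [pvWhileB]; rw [if_pos hcnd]
  simp only [pvBodyB, hf, hw]

-- head of the remaining queue: drop idx = arr[idx] :: drop (idx+1), and pyGet? agrees
theorem pvDropCons (arr : List Int) (idx : Int) (h0 : 0 ≤ idx) (hl : idx < (arr.length : Int)) :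
    arr.drop idx.toNat
      = (PySem.List.pyGet? arr idx).getD 0 :: arr.drop (idx.toNat + 1) := by
  have hlt : idx.toNat < arr.length := by omega
  have hg : PySem.List.pyGet? arr idx = some arr[idx.toNat] := by
    rw [PySem.List.pyGet?_of_nonneg arr h0]; exact List.getElem?_eq_getElem hlt
  rw [List.drop_eq_getElem_cons hlt, hg]
  rfl

-- one bus in B: starting mid-bus with f seats left, B consumes exactly the capped scan
theorem pvOneBus (n t : Int) (cap : Nat) (arr : List Int) (b : Int) (hb : b ≤ n) :
    ∀ (f used : Nat) (idx last : Int), used + f = cap → 0 ≤ idx → idx ≤ (arr.length : Int) →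
    pvBodyB n t cap (arr.drop idx.toNat) b used (idx - 1) last =
      if pvScanB arr (540 + (b - 1) * t) f idx = (arr.length : Int) then
        (pvScanB arr (540 + (b - 1) * t) f idx - 1,
         if b = n then last + (pvScanB arr (540 + (b - 1) * t) f idx - idx) else last)
      else
        pvBodyB n t cap (arr.drop (pvScanB arr (540 + (b - 1) * t) f idx).toNat) (b + 1) 0
          (pvScanB arr (540 + (b - 1) * t) f idx - 1)
          (if b = n then last + (pvScanB arr (540 + (b - 1) * t) f idx - idx) else last) := by
  intro f
  induction f with
  | zero =>
    intro used idx last hcap h0 hL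
    have hu : used = cap := by omega
    have hs : pvScanB arr (540 + (b - 1) * t) 0 idx = idx := rfl
    simp only [hs]
    have hz : (if b = n then last + (idx - idx) else last) = last := by split <;> omega
    rw [hz]
    by_cases hend : idx = (arr.length : Int)
    · have hd : arr.drop idx.toNat = [] := List.drop_eq_nil_of_le (by omega)
      rw [if_pos hend, hd]
      rfl
    · rw [if_neg hend]
      have hlt : idx < (arr.length : Int) := by omega
      rw [pvDropCons arr idx h0 hlt]
      rw [pvBodyB_adv n t cap _ _ b used _ _ hb (Or.inl hu)]
  | succ f ih =>
    intro used idx last hcap h0 hL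
    by_cases hend : idx = (arr.length : Int)
    · have hd : arr.drop idx.toNat = [] := List.drop_eq_nil_of_le (by omega)
      have hs : pvScanB arr (540 + (b - 1) * t) (f + 1) idx = idx := by
        simp only [pvScanB]; rw [if_neg (fun h => absurd h.1 (by omega))]
      simp only [hs]
      have hz : (if b = n then last + (idx - idx) else last) = last := by split <;> omega
      rw [hz, if_pos hend, hd]
      rfl
    · have hlt : idx < (arr.length : Int) := by omega
      by_cases hc : (PySem.List.pyGet? arr idx).getD 0 ≤ 540 + (b - 1) * t
      · have hcc : idx < (arr.length : Int) ∧
            (PySem.List.pyGet? arr idx).getD 0 ≤ 540 + (b - 1) * t := ⟨hlt, hc⟩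
        have hs : pvScanB arr (540 + (b - 1) * t) (f + 1) idx
            = pvScanB arr (540 + (b - 1) * t) f (idx + 1) := by
          simp only [pvScanB]; rw [if_pos hcc]
        simp only [hs]
        have hw := pvWhileB_stay n t cap ((PySem.List.pyGet? arr idx).getD 0)
          (n + 1 - b).toNat b used (by
            intro hh
            rcases hh.2 with h | h
            · omega
            · omega)
        rw [pvDropCons arr idx h0 hlt]
        simp only [pvBodyB, hw]
        rw [if_neg (show ¬ n < b by omega)]
        rw [show idx.toNat + 1 = (idx + 1).toNat from by omega,
            show idx - 1 + 1 = idx + 1 - 1 from by omega]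
        rw [ih (used + 1) (idx + 1) (if b = n then last + 1 else last) (by omega) (by omega)
            (by omega)]
        have hl : (if b = n then
              (if b = n then last + 1 else last)
                + (pvScanB arr (540 + (b - 1) * t) f (idx + 1) - (idx + 1))
            else (if b = n then last + 1 else last))
            = (if b = n then last + (pvScanB arr (540 + (b - 1) * t) f (idx + 1) - idx)
               else last) := by
          by_cases hbn : b = n <;> simp [hbn]
          omega
        rw [hl]
      · have hs : pvScanB arr (540 + (b - 1) * t) (f + 1) idx = idx := by
          simp only [pvScanB]; rw [if_neg (fun h => hc h.2)]
        simp only [hs]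
        have hz : (if b = n then last + (idx - idx) else last) = last := by split <;> omega
        rw [hz, if_neg hend]
        rw [pvDropCons arr idx h0 hlt]
        rw [pvBodyB_adv n t cap _ _ b used _ _ hb (Or.inr (by omega))]

-- pvG starting at the end of the queue only keeps its accumulators
theorem pvG_stuck (n t : Int) (arr : List Int) (cap : Nat) (k : Nat) :
    ∀ (b last : Int), pvG n t arr cap k b (arr.length : Int) last = ((arr.length : Int), last) := by
  induction k with
  | zero => intro b last; rfl
  | succ k ih =>
    intro b last
    have hscan : pvScanB arr (540 + (b - 1) * t) cap (arr.length : Int) = (arr.length : Int) := by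
      cases cap with
      | zero => rfl
      | succ c => simp only [pvScanB]; rw [if_neg (by intro h; omega)]
    simp only [pvG, hscan]
    rw [ih]
    congr 1
    split <;> omega

-- main lockstep: B's passenger-major pass equals the bus-major scan loop pvG
theorem pvOuterB (n t : Int) (cap : Nat) (arr : List Int) (k : Nat) :
    ∀ (b idx last : Int), b + k = n + 1 → 0 ≤ idx → idx ≤ (arr.length : Int) →
    pvBodyB n t cap (arr.drop idx.toNat) b 0 (idx - 1) last
      = ((pvG n t arr cap k b idx last).1 - 1, (pvG n t arr cap k b idx last).2) := by
  induction k with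
  | zero =>
    intro b idx last hk h0 hL
    rw [pvBodyB_stop n t cap _ b 0 _ _ (by omega)]
    rfl
  | succ k ih =>
    intro b idx last hk h0 hL
    have hb : b ≤ n := by omega
    rw [pvOneBus n t cap arr b hb cap 0 idx last (by omega) h0 hL]
    simp only [pvG]
    set s := pvScanB arr (540 + (b - 1) * t) cap idx with hs
    have hs0 : idx ≤ s := pvScanB_le arr _ cap idx
    have hsL : s ≤ (arr.length : Int) := pvScanB_le_len arr _ cap idx hL
    by_cases hend : s = (arr.length : Int)
    · rw [if_pos hend, hend, pvG_stuck]
    · rw [if_neg hend]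
      by_cases hbn : b = n
      · have hk0 : k = 0 := by omega
        subst hk0
        rw [pvBodyB_stop n t cap _ (b + 1) 0 _ _ (by omega)]
        rfl
      · exact ih (b + 1) s (if b = n then last + (s - idx) else last) (by omega) (by omega) hsL

-- ===== VERDICT (by name: the statement is the Claim_ definition above) =====
theorem get_bus_status_py_spec : Claim_equal_get_bus_status_py := by
  intro n m t arr _
  unfold Spec_get_bus_status_py get_bus_status_py get_bus_status_py_alt
  dsimp only
  by_cases hn : 0 ≤ n
  · have hA := pvOuterA n m t arr n.toNat 1 0 0 (by omega) (by omega)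
    have hB := pvOuterB n t (max m 0).toNat arr n.toNat 1 0 0 (by omega) (by omega)
      (Int.natCast_nonneg arr.length)
    have har : 540 - t + (1 - 1) * t = 9 * 60 - t := by ring
    rw [har] at hA
    have h01 : (0 : Int) - 1 = -1 := by omega
    rw [h01] at hA hB
    simp only [Int.toNat_zero, List.drop_zero] at hB
    have hmax : (max m 0).toNat = m.toNat := by omega
    rw [hmax] at hB ⊢
    dsimp only at hA hB
    rw [Prod.mk.injEq] at hA hB
    rw [Prod.mk.injEq]
    refine ⟨hA.1.trans hB.1.symm, ?_⟩
    rw [hA.2, hB.2]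
  · have hnil : PySem.List.pyRange 1 (n + 1) 1 = [] :=
      PySem.List.pyRange_one_eq_nil (by omega)
    rw [pvBodyB_stop n t _ arr 1 0 (-1) 0 (by omega)]
    simp [hnil]
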